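-- pv_equiv track=rewrite | github.com/ChrisCantReid623/Codefolio | maze_solver.py | generate_cells
-- ===== SOURCE A (Python) =====
-- def generate_cells(maze_lines):
--     """ Generates the (x,y) coordinate pair locations of every walkable
--     cell in the maze.
--
--     Parameters:
--         maze_lines: a list, contains the lines of the maze txt file
--     """
--     coordinates = []
--     start = None
--     end = None
--
--     y_val = 0
--     for line in maze_lines:
--         x_val = 0
--         for cell in line:
--             if cell == 'S':
--                 start = x_val, y_val
--             elif cell == 'E':
--                 end = x_val, y_val
--             if cell != ' ' and cell != '\n':
--                 coordinates.append((x_val, y_val))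
--                 x_val += 1
--             else:
--                 x_val += 1
--         y_val += 1
--     return coordinates, start, end
-- ===== SOURCE B (Python) =====
-- def generate_cells(maze_lines):
--     coordinates = [(x, y)
--                    for y, line in enumerate(maze_lines)
--                    for x, c in enumerate(line)
--                    if c != ' ' and c != '\n']
--     starts = [(x, y)
--               for y, line in enumerate(maze_lines)
--               for x, c in enumerate(line)
--               if c == 'S']
--     ends = [(x, y)
--             for y, line in enumerate(maze_lines)
--             for x, c in enumerate(line)
--             if c == 'E']
--     start = starts[-1] if starts else None
--     end = ends[-1] if ends else None
--     return coordinates, start, end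
-- ===== Notes on version B (the rewrite author's own statement) =====
-- stated objective: alternative
-- what changed: A's single fused pass with mutable x/y counters and in-place start/end updates is replaced by three separate enumerate-based comprehension passes (coordinates, all 'S' hits, all 'E' hits), with start/end taken as the last element of the collected match lists.
import Mathlib
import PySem

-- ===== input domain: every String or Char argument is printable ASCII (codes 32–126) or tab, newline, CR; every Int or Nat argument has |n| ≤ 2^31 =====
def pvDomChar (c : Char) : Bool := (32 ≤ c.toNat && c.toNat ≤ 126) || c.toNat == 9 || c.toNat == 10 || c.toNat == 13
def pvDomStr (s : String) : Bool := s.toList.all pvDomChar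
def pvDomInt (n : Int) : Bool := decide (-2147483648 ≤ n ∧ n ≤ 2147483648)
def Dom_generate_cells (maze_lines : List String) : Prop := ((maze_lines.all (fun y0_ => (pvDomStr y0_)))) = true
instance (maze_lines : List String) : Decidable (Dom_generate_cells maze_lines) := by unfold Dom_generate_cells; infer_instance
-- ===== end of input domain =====

-- B replaces A's fused counter loop by three separate enumerate comprehensions plus last-element picks (objective: alternative decomposition).

-- ===== PORT A =====
-- one step of A's inner `for cell in line` loop; state = (coordinates, start, end, x_val)
def gcStep (y : Int) (t : (List (Int × Int)) × (Option (Int × Int)) × (Option (Int × Int)) × Int) (cell : Char) :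
    (List (Int × Int)) × (Option (Int × Int)) × (Option (Int × Int)) × Int :=
  let st := if cell = 'S' then some (t.2.2.2, y) else t.2.1
  let en := if cell = 'S' then t.2.2.1 else if cell = 'E' then some (t.2.2.2, y) else t.2.2.1
  if cell ≠ ' ' ∧ cell ≠ '\n' then (t.1 ++ [(t.2.2.2, y)], st, en, t.2.2.2 + 1)
  else (t.1, st, en, t.2.2.2 + 1)

-- one step of A's outer `for line in maze_lines` loop; state = (coordinates, start, end, y_val)
def gcLine (s : (List (Int × Int)) × (Option (Int × Int)) × (Option (Int × Int)) × Int) (line : String) :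
    (List (Int × Int)) × (Option (Int × Int)) × (Option (Int × Int)) × Int :=
  let r := line.toList.foldl (gcStep s.2.2.2) (s.1, s.2.1, s.2.2.1, (0 : Int))
  (r.1, r.2.1, r.2.2.1, s.2.2.2 + 1)

def generate_cells (maze_lines : List String) : (List (Int × Int)) × (Option (Int × Int)) × (Option (Int × Int)) :=
  let r := maze_lines.foldl gcLine ([], none, none, (0 : Int))
  (r.1, r.2.1, r.2.2.1)

-- ===== PORT B =====
-- one nested comprehension pass: all (x, y) whose character satisfies p
def gcCells (p : Char → Bool) (maze_lines : List String) : List (Int × Int) :=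
  (PySem.List.enumerate maze_lines 0).flatMap (fun yl =>
    (PySem.List.enumerate yl.2.toList 0).filterMap (fun xc =>
      if p xc.2 then some (xc.1, yl.1) else none))

def generate_cells_alt (maze_lines : List String) : (List (Int × Int)) × (Option (Int × Int)) × (Option (Int × Int)) :=
  let coordinates := gcCells (fun c => c != ' ' && c != '\n') maze_lines
  let starts := gcCells (fun c => c == 'S') maze_lines
  let ends := gcCells (fun c => c == 'E') maze_lines
  (coordinates, starts.getLast?, ends.getLast?)

-- ===== PRECONDITION & SPEC =====
def Spec_generate_cells (maze_lines : List String) (out : (List (Int × Int)) × (Option (Int × Int)) × (Option (Int × Int))) : Prop := out = generate_cells_alt maze_lines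
instance (maze_lines : List String) (out : (List (Int × Int)) × (Option (Int × Int)) × (Option (Int × Int))) : Decidable (Spec_generate_cells maze_lines out) := by unfold Spec_generate_cells; infer_instance

-- ===== CLAIM (what is proved, stated in full; the proofs are below) =====
def Claim_equal_generate_cells : Prop := ∀ (maze_lines : List String), Dom_generate_cells maze_lines → Spec_generate_cells maze_lines (generate_cells maze_lines)

-- ===== LEMMAS AND PROOFS =====

-- `foldl (fun _ p => some p) s0` over a list keeps the last element (or s0 if empty)
theorem foldl_lastOpt {α : Type} (l : List α) (s0 : Option α) :
    l.foldl (fun _ p => some p) s0 = (l.getLast?).elim s0 some := by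
  induction l generalizing s0 with
  | nil => rfl
  | cons a l ih =>
    rw [List.foldl_cons, ih]
    cases l with
    | nil => simp
    | cons b t =>
      rw [List.getLast?_cons_cons]
      cases h : (b :: t).getLast? with
      | none => simp at h
      | some v => rfl

-- characterisation of A's inner loop over one line's characters
theorem inner_char (cs : List Char) (y x0 : Int) (c : List (Int × Int)) (st en : Option (Int × Int)) :
    cs.foldl (gcStep y) (c, st, en, x0) =
    (c ++ (PySem.List.enumerate cs x0).filterMap
        (fun xc => if (xc.2 != ' ' && xc.2 != '\n') then some (xc.1, y) else none),
     ((PySem.List.enumerate cs x0).filterMap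
        (fun xc => if xc.2 == 'S' then some (xc.1, y) else none)).foldl (fun _ p => some p) st,
     ((PySem.List.enumerate cs x0).filterMap
        (fun xc => if xc.2 == 'E' then some (xc.1, y) else none)).foldl (fun _ p => some p) en,
     x0 + cs.length) := by
  induction cs generalizing x0 c st en with
  | nil => simp [PySem.List.enumerate_nil]
  | cons a l ih =>
    simp only [List.foldl, PySem.List.enumerate_cons, List.filterMap]
    rw [gcStep, ih]
    by_cases hS : a = 'S' <;> by_cases hE : a = 'E' <;>
      by_cases hsp : a = ' ' <;> by_cases hnl : a = '\n' <;>
      simp_all <;> omega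

-- characterisation of A's outer loop
theorem outer_line (lines : List String) (y0 : Int) (c : List (Int × Int)) (st en : Option (Int × Int)) :
    lines.foldl gcLine (c, st, en, y0) =
    (c ++ (PySem.List.enumerate lines y0).flatMap (fun yl =>
        (PySem.List.enumerate yl.2.toList 0).filterMap
          (fun xc => if (xc.2 != ' ' && xc.2 != '\n') then some (xc.1, yl.1) else none)),
     ((PySem.List.enumerate lines y0).flatMap (fun yl =>
        (PySem.List.enumerate yl.2.toList 0).filterMap
          (fun xc => if xc.2 == 'S' then some (xc.1, yl.1) else none))).foldl (fun _ p => some p) st,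
     ((PySem.List.enumerate lines y0).flatMap (fun yl =>
        (PySem.List.enumerate yl.2.toList 0).filterMap
          (fun xc => if xc.2 == 'E' then some (xc.1, yl.1) else none))).foldl (fun _ p => some p) en,
     y0 + lines.length) := by
  induction lines generalizing y0 c st en with
  | nil => simp [PySem.List.enumerate_nil]
  | cons a l ih =>
    simp only [List.foldl, PySem.List.enumerate_cons, List.flatMap_cons]
    rw [gcLine]
    simp only [inner_char, ih, List.foldl_append, List.append_assoc]
    have h : y0 + 1 + (l.length : Int) = y0 + ((a :: l).length : Int) := by push_cast [List.length_cons]; omega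
    rw [h]

-- ===== VERDICT (by name: the statement is the Claim_ definition above) =====
theorem generate_cells_spec : Claim_equal_generate_cells := by
  intro maze_lines _
  unfold Spec_generate_cells generate_cells generate_cells_alt gcCells
  simp only [outer_line, List.nil_append, foldl_lastOpt]
  cases hS : (((PySem.List.enumerate maze_lines 0).flatMap (fun yl =>
        (PySem.List.enumerate yl.2.toList 0).filterMap
          (fun xc => if xc.2 == 'S' then some (xc.1, yl.1) else none)))).getLast? <;>
  cases hE : (((PySem.List.enumerate maze_lines 0).flatMap (fun yl =>
        (PySem.List.enumerate yl.2.toList 0).filterMap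
          (fun xc => if xc.2 == 'E' then some (xc.1, yl.1) else none)))).getLast? <;>
  simp
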